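-- pv_equiv track=rewrite | github.com/artjom3729/Programmeerimise-advendikalender | 3. detsember.py | find_tree_number
-- ===== SOURCE A (Python) =====
-- def find_tree_number(input_str):
--     input_str = input_str.strip().split()
--     input_str = [letter for letter in input_str if letter != " "]
--
--     number = 1
--
--     for letter in input_str:
--         if letter == "p":
--             number *= 2
--         if letter == "v":
--             number = number * 2 - 1
--
--     return number
-- ===== SOURCE B (Python) =====
-- def find_tree_number(input_str):
--     ops = [t for t in input_str.split() if t in ("p", "v")]
--     n = len(ops)
--     return 2 ** n - sum(2 ** (n - 1 - i) for i, t in enumerate(ops) if t == "v")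
-- ===== Notes on version B (the rewrite author's own statement) =====
-- stated objective: alternative
-- what changed: Replaces the step-by-step affine fold over the tokens by a closed form: with n recognised operations, the result is 2^n minus the sum of 2^(n-1-i) over the indices i of the subtract-one operations.
import Mathlib
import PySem

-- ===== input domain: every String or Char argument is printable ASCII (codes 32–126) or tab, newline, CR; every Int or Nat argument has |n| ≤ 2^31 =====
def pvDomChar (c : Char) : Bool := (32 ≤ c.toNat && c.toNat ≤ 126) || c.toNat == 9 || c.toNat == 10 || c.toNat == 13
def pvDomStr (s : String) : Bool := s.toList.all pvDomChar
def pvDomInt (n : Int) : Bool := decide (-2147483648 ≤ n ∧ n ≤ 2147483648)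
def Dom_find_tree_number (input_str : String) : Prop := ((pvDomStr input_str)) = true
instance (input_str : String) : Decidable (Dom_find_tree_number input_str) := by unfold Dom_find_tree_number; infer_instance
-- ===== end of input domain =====

-- B replaces A's step-by-step fold over the tokens by the closed form
-- 2^n − Σ_{v at op-index i} 2^(n−1−i) over the p/v tokens (alternative decomposition, same cost).

-- ===== PORT A =====
def find_tree_number (input_str : String) : Int :=
  let toks := PySem.Str.split₀ (PySem.Str.strip input_str)
  let toks := toks.filter (fun letter => letter ≠ " ")
  toks.foldl (fun number letter =>
    let number := if letter = "p" then number * 2 else number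
    if letter = "v" then number * 2 - 1 else number) 1

-- ===== PORT B =====
def find_tree_number_alt (input_str : String) : Int :=
  let ops := (PySem.Str.split₀ input_str).filter (fun t => t = "p" ∨ t = "v")
  let n := ops.length
  (2 : Int) ^ n -
    (PySem.List.enumerate ops).foldl
      (fun acc it => if it.2 = "v" then acc + (2 : Int) ^ (((n : Int) - 1 - it.1).toNat) else acc) 0

-- ===== PRECONDITION & SPEC =====
def Spec_find_tree_number (input_str : String) (out : Int) : Prop := out = find_tree_number_alt input_str
instance (input_str : String) (out : Int) : Decidable (Spec_find_tree_number input_str out) := by unfold Spec_find_tree_number; infer_instance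

-- ===== CLAIM (what is proved, stated in full; the proofs are below) =====
def Claim_equal_find_tree_number : Prop := ∀ (input_str : String), Dom_find_tree_number input_str → Spec_find_tree_number input_str (find_tree_number input_str)

-- ===== LEMMAS AND PROOFS =====

-- the predicate "token is an op"
def pvIsOp (t : String) : Bool := decide (t = "p" ∨ t = "v")

-- the "remaining doublings" weight of the v-tokens of a list, back-to-front
def pvS : List String → Int
  | [] => 0
  | t :: l => (if t = "v" then (2 : Int) ^ (l.filter pvIsOp).length else 0) + pvS l

lemma pvFoldA (l : List String) (num : Int) :
    l.foldl (fun number letter =>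
      let number := if letter = "p" then number * 2 else number
      if letter = "v" then number * 2 - 1 else number) num
    = num * (2 : Int) ^ (l.filter pvIsOp).length - pvS l := by
  induction l generalizing num with
  | nil => simp [pvS]
  | cons t l ih =>
    rw [List.foldl_cons, ih]
    have hpv : ("p":String) ≠ "v" := by decide
    by_cases hp : t = "p"
    · subst hp
      simp only [pvS, pvIsOp, List.filter_cons]
      simp [hpv, pow_succ]
      ring
    · by_cases hv : t = "v"
      · subst hv
        simp only [pvS, pvIsOp, List.filter_cons]
        simp [Ne.symm hpv, pow_succ]
        ring
      · simp [pvS, pvIsOp, hp, hv]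

-- a filter that keeps every op changes neither the op sublist nor pvS
lemma pvFilterSub (q : String → Bool) (hq : ∀ t, pvIsOp t = true → q t = true) :
    ∀ l : List String, (l.filter q).filter pvIsOp = l.filter pvIsOp := by
  intro l
  induction l with
  | nil => rfl
  | cons t l ih =>
    by_cases ho : pvIsOp t = true
    · rw [List.filter_cons_of_pos (hq t ho), List.filter_cons_of_pos ho,
        List.filter_cons_of_pos ho, ih]
    · by_cases hqt : q t = true
      · rw [List.filter_cons_of_pos hqt, List.filter_cons_of_neg (by simpa using ho),
          List.filter_cons_of_neg (by simpa using ho), ih]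
      · rw [List.filter_cons_of_neg (by simpa using hqt),
          List.filter_cons_of_neg (by simpa using ho), ih]

lemma pvSFilter (q : String → Bool) (hq : ∀ t, pvIsOp t = true → q t = true) :
    ∀ l : List String, pvS (l.filter q) = pvS l := by
  intro l
  induction l with
  | nil => rfl
  | cons t l ih =>
    by_cases hqt : q t = true
    · rw [List.filter_cons_of_pos hqt]
      simp only [pvS, pvFilterSub q hq l, ih]
    · have hv : t ≠ "v" := by
        intro h; exact hqt (hq t (by simp [pvIsOp, h]))
      rw [List.filter_cons_of_neg (by simpa using hqt)]
      simp [pvS, hv, ih]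

-- the enumerate-fold of B computes pvS on an all-ops list
lemma pvFoldB (n : Int) : ∀ (os : List String) (k : Int) (acc : Int),
    0 ≤ k → k + os.length = n → (∀ t ∈ os, pvIsOp t = true) →
    (PySem.List.enumerate os k).foldl
      (fun acc it => if it.2 = "v" then acc + (2 : Int) ^ ((n - 1 - it.1).toNat) else acc) acc
    = acc + pvS os := by
  intro os
  induction os with
  | nil => intro k acc _ _ _; simp [PySem.List.enumerate, pvS]
  | cons t os ih =>
    intro k acc hk hn hops
    have hexp : (n - 1 - k).toNat = os.length := by
      simp at hn; omega
    have hfil : (os.filter pvIsOp).length = os.length := by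
      rw [List.filter_eq_self.mpr (fun t ht => hops t (List.mem_cons_of_mem _ ht))]
    have hrec := fun acc => ih (k + 1) acc (by omega : (0:Int) ≤ k + 1)
    rw [PySem.List.enumerate_cons, List.foldl_cons]
    by_cases hv : t = "v"
    · rw [hrec _ (by simp at hn ⊢; omega) (fun t ht => hops t (List.mem_cons_of_mem _ ht))]
      simp [hv, pvS, hexp, hfil]
      ring
    · rw [hrec _ (by simp at hn ⊢; omega) (fun t ht => hops t (List.mem_cons_of_mem _ ht))]
      simp [hv, pvS]

-- stripping does not change split₀
lemma pvGoTrailing : ∀ (sp : List Char), (∀ c ∈ sp, PySem.Chars.isspace c = true) →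
    ∀ (cur : List Char) (acc : List (List Char)),
    PySem.Chars.split₀.go sp cur acc = PySem.Chars.split₀.go [] cur acc := by
  intro sp
  induction sp with
  | nil => intro _ _ _; rfl
  | cons c sp ih =>
    intro hsp cur acc
    have hc : PySem.Chars.isspace c = true := hsp c (List.mem_cons_self ..)
    have hsp' : ∀ c ∈ sp, PySem.Chars.isspace c = true :=
      fun c hc => hsp c (List.mem_cons_of_mem _ hc)
    by_cases hcur : cur.isEmpty
    · simp [PySem.Chars.split₀.go, hc, hcur, ih hsp']
    · simp [PySem.Chars.split₀.go, hc, hcur, ih hsp']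

lemma pvGoAppend : ∀ (s sp : List Char), (∀ c ∈ sp, PySem.Chars.isspace c = true) →
    ∀ (cur : List Char) (acc : List (List Char)),
    PySem.Chars.split₀.go (s ++ sp) cur acc = PySem.Chars.split₀.go s cur acc := by
  intro s
  induction s with
  | nil => intro sp hsp cur acc; simpa using pvGoTrailing sp hsp cur acc
  | cons c s ih =>
    intro sp hsp cur acc
    by_cases hc : PySem.Chars.isspace c
    · by_cases hcur : cur.isEmpty
      · simp [PySem.Chars.split₀.go, hc, hcur, ih sp hsp]
      · simp [PySem.Chars.split₀.go, hc, hcur, ih sp hsp]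
    · simp [PySem.Chars.split₀.go, hc, ih sp hsp]

lemma pvGoLeading : ∀ (s : List Char) (acc : List (List Char)),
    PySem.Chars.split₀.go (List.dropWhile PySem.Chars.isspace s) [] acc
    = PySem.Chars.split₀.go s [] acc := by
  intro s
  induction s with
  | nil => intro acc; rfl
  | cons c s ih =>
    intro acc
    by_cases hc : PySem.Chars.isspace c
    · simpa [List.dropWhile, hc, PySem.Chars.split₀.go] using ih acc
    · simp [List.dropWhile, hc]

lemma pvSplitStrip (w : List Char) :
    PySem.Chars.split₀ (PySem.Chars.strip w) = PySem.Chars.split₀ w := by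
  unfold PySem.Chars.split₀ PySem.Chars.strip PySem.Chars.rstrip PySem.Chars.lstrip
  have hdecomp : ∀ u : List Char,
      u = (List.dropWhile PySem.Chars.isspace u.reverse).reverse
        ++ (List.takeWhile PySem.Chars.isspace u.reverse).reverse := by
    intro u
    apply List.reverse_injective
    simp [List.takeWhile_append_dropWhile]
  have h3 : ∀ u : List Char,
      PySem.Chars.split₀.go u [] []
      = PySem.Chars.split₀.go ((List.dropWhile PySem.Chars.isspace u.reverse).reverse) [] [] := by
    intro u
    conv_lhs => rw [hdecomp u]
    exact pvGoAppend _ _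
      (fun c hc => List.mem_takeWhile_imp (List.mem_reverse.mp hc)) [] []
  rw [← h3, pvGoLeading]

lemma pvSplitStripStr (s : String) :
    PySem.Str.split₀ (PySem.Str.strip s) = PySem.Str.split₀ s := by
  unfold PySem.Str.split₀
  rw [PySem.Str.toList_strip, pvSplitStrip]

-- ===== VERDICT (by name: the statement is the Claim_ definition above) =====
theorem find_tree_number_spec : Claim_equal_find_tree_number := by
  intro s _
  unfold Spec_find_tree_number find_tree_number find_tree_number_alt
  simp only [pvSplitStripStr]
  rw [pvFoldA]
  have hq1 : ∀ t, pvIsOp t = true → (decide (t ≠ " ")) = true := by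
    intro t ht
    rcases (by simpa [pvIsOp] using ht : t = "p" ∨ t = "v") with h | h <;> simp [h]
  have hq2 : ∀ t, pvIsOp t = true → pvIsOp t = true := fun _ h => h
  have hops : ((PySem.Str.split₀ s).filter (fun t => decide (t = "p" ∨ t = "v")))
      = (PySem.Str.split₀ s).filter pvIsOp := rfl
  rw [hops]
  have hall : ∀ t ∈ (PySem.Str.split₀ s).filter pvIsOp, pvIsOp t = true :=
    fun t ht => (List.mem_filter.mp ht).2
  rw [pvFoldB (n := (((PySem.Str.split₀ s).filter pvIsOp).length : Int)) _ 0 0 le_rfl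
    (by simp) hall]
  have e1 : ((PySem.Str.split₀ s).filter (fun letter => decide (letter ≠ " "))).filter pvIsOp
      = (PySem.Str.split₀ s).filter pvIsOp := pvFilterSub _ hq1 _
  have e2 : pvS ((PySem.Str.split₀ s).filter (fun letter => decide (letter ≠ " ")))
      = pvS (PySem.Str.split₀ s) := pvSFilter _ hq1 _
  have e3 : pvS ((PySem.Str.split₀ s).filter pvIsOp) = pvS (PySem.Str.split₀ s) :=
    pvSFilter _ hq2 _
  simp only [e1, e2, e3]
  ring
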